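-- pv_equiv track=rewrite | github.com/miliar/Code_Jam_Webscraper | Solutions_python/Problem_181/588.py | solve
-- ===== SOURCE A (Python) =====
-- def solve(s):
--     s = [i for i in s]
--     result = [s[0]]
--     s = s[1:]
--     for i in s:
--         if i>=result[0]:
--             result.insert(0, i)
--         else:
--             result.append(i)
--     return ''.join(result)
-- ===== SOURCE B (Python) =====
-- def solve(s):
--     # A char lands at the front iff it is >= every earlier char (a prefix-maximum record).
--     # Pass 1: prefix maxima; pass 2/3: classify each char against its prefix maximum.
--     m = s[0]
--     prefix = []
--     for c in s:
--         prefix.append(m)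
--         if m < c:
--             m = c
--     keep = [c >= p for c, p in zip(s, prefix)]
--     front = [c for c, k in zip(s, keep) if k]
--     back = [c for c, k in zip(s, keep) if not k]
--     return ''.join(front[::-1] + back)
-- ===== Notes on version B (the rewrite author's own statement) =====
-- stated objective: faster
-- what changed: B replaces A's on-line greedy that mutates a result list with insert(0,..) by a record-based characterization: it first computes the prefix maxima of the string, then classifies each char by comparing it to its prefix maximum, and returns the reversed records followed by the non-records.
import Mathlib
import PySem

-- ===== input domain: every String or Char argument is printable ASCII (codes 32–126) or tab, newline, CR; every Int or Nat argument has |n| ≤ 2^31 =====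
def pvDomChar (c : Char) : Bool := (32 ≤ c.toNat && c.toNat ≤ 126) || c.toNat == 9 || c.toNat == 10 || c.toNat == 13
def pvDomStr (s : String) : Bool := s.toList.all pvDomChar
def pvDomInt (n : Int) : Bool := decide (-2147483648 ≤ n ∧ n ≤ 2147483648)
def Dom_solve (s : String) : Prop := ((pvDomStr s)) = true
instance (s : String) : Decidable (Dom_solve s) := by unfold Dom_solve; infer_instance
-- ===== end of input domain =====

-- B replaces A's on-line greedy (insert(0,..) into one list) by a staged record computation:
-- prefix maxima, then classification of each char against its prefix maximum (faster).

-- ===== PORT A =====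
-- each loop step: if i >= result[0] then insert at front else append (result never empty)
def solveStep (result : List Char) (i : Char) : List Char :=
  match result with
  | [] => [i]                                   -- unreachable: result starts nonempty
  | r0 :: _ => if r0 ≤ i then i :: result else result ++ [i]

def solve (s : String) : String :=
  match s.toList with
  | [] => ""                                    -- A raises IndexError here; excluded by Pre_solve
  | c :: rest => String.mk (rest.foldl solveStep [c])

-- ===== PORT B =====
def solve_alt (s : String) : String :=
  match s.toList with
  | [] => ""                                    -- B raises IndexError here; excluded by Pre_solve
  | c0 :: rest =>
    let l := c0 :: rest
    -- pass 1: prefix maxima (prefix.append(m); if m < c: m = c)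
    let st := l.foldl (fun (st : List Char × Char) c =>
        (st.1 ++ [st.2], if st.2 < c then c else st.2)) ([], c0)
    -- pass 2: keep[i] = (s[i] >= prefix[i])
    let keep := (l.zip st.1).map (fun p => decide (p.2 ≤ p.1))
    -- pass 3: split into front/back, reverse front
    let front := ((l.zip keep).filter (fun p => p.2)).map Prod.fst
    let back := ((l.zip keep).filter (fun p => !p.2)).map Prod.fst
    String.mk (front.reverse ++ back)

-- ===== PRECONDITION & SPEC =====
-- Pre_ excludes only the empty string, on which both Pythons raise IndexError at s[0].
def Pre_solve (s : String) : Prop := s ≠ ""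
instance (s : String) : Decidable (Pre_solve s) := by unfold Pre_solve; infer_instance
def pvWitness_solve : String := "ba"

def Spec_solve (s : String) (out : String) : Prop := out = solve_alt s
instance (s : String) (out : String) : Decidable (Spec_solve s out) := by unfold Spec_solve; infer_instance

-- ===== CLAIM (what is proved, stated in full; the proofs are below) =====
def Claim_equal_solve : Prop := ∀ (s : String), Dom_solve s → Pre_solve s → Spec_solve s (solve s)

-- ===== LEMMAS AND PROOFS =====

-- the chars that end up in front (prefix-maximum records), running max m
def recFront (m : Char) : List Char → List Char
  | [] => []
  | c :: t => if m ≤ c then c :: recFront c t else recFront m t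

-- the chars that end up in back
def recBack (m : Char) : List Char → List Char
  | [] => []
  | c :: t => if m ≤ c then recBack c t else c :: recBack m t

-- prefix-maxima list (characterizes B's pass 1)
def pmax (m : Char) : List Char → List Char
  | [] => []
  | c :: t => m :: pmax (if m < c then c else m) t

lemma pm_fold (l : List Char) : ∀ (acc : List Char) (m : Char),
    (l.foldl (fun (st : List Char × Char) c =>
        (st.1 ++ [st.2], if st.2 < c then c else st.2)) (acc, m)).1 = acc ++ pmax m l := by
  induction l with
  | nil => intro acc m; simp [pmax]
  | cons c t ih => intro acc m; simp [pmax, ih]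

lemma max_of_le {m c : Char} (h : m ≤ c) : (if m < c then c else m) = c := by
  by_cases h' : m < c
  · simp [h']
  · simp [le_antisymm h (le_of_not_gt h')]

lemma max_of_gt {m c : Char} (h : ¬ m ≤ c) : (if m < c then c else m) = m := by
  have : ¬ m < c := fun hl => h (le_of_lt hl)
  simp [this]

lemma front_eq (l : List Char) : ∀ (m : Char),
    (((l.zip ((l.zip (pmax m l)).map (fun p => decide (p.2 ≤ p.1)))).filter
        (fun p => p.2)).map Prod.fst) = recFront m l := by
  induction l with
  | nil => intro m; simp [recFront]
  | cons c t ih =>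
    intro m
    by_cases h : m ≤ c
    · simp [pmax, recFront, h, max_of_le h, ih]
    · simp [pmax, recFront, h, max_of_gt h, ih]

lemma back_eq (l : List Char) : ∀ (m : Char),
    (((l.zip ((l.zip (pmax m l)).map (fun p => decide (p.2 ≤ p.1)))).filter
        (fun p => !p.2)).map Prod.fst) = recBack m l := by
  induction l with
  | nil => intro m; simp [recBack]
  | cons c t ih =>
    intro m
    by_cases h : m ≤ c
    · simp [pmax, recBack, h, max_of_le h, ih]
    · simp [pmax, recBack, h, max_of_gt h, ih]

-- A's loop computes (front ++ records).reverse ++ (back ++ non-records)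
lemma a_inv (l : List Char) : ∀ (front back : List Char) (cur : Char) (t : List Char),
    front.reverse = cur :: t →
    l.foldl solveStep (front.reverse ++ back) =
      (front ++ recFront cur l).reverse ++ (back ++ recBack cur l) := by
  induction l with
  | nil => intro front back cur t h; simp [recFront, recBack]
  | cons c l ih =>
    intro front back cur t h
    simp only [List.foldl_cons]
    by_cases hc : cur ≤ c
    · have hA : solveStep (front.reverse ++ back) c = (front ++ [c]).reverse ++ back := by
        simp [solveStep, h, hc]
      rw [hA, ih (front ++ [c]) back c (cur :: t) (by simp [h])]
      simp [recFront, recBack, hc]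
    · have hA : solveStep (front.reverse ++ back) c = front.reverse ++ (back ++ [c]) := by
        simp [solveStep, h, hc]
      rw [hA, ih front (back ++ [c]) cur t h]
      simp [recFront, recBack, hc]

-- ===== VERDICT (by name: the statement is the Claim_ definition above) =====
theorem solve_spec : Claim_equal_solve := by
  intro s _ _
  unfold Spec_solve solve solve_alt
  cases h : s.toList with
  | nil => rfl
  | cons c0 rest =>
    simp only [pm_fold, List.nil_append, front_eq, back_eq]
    have hA := a_inv rest [c0] [] c0 [] (by simp)
    simp only [List.reverse_cons, List.reverse_nil, List.nil_append, List.append_nil] at hA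
    rw [hA]
    have h1 : recFront c0 (c0 :: rest) = c0 :: recFront c0 rest := by
      simp [recFront]
    have h2 : recBack c0 (c0 :: rest) = recBack c0 rest := by
      simp [recBack]
    rw [h1, h2]
    simp
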